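-- pv_equiv track=rewrite | github.com/fpikon/Algorytmy_i_struktury_danych | LAB_13/sufiksy.py | binary_search_suffix_array
-- ===== SOURCE A (Python) =====
-- def build_suffix_array(text):
--     suffixes = [(text[i:], i) for i in range(len(text))]
--     suffixes.sort()
--     return [index for _, index in suffixes]
--
-- def binary_search_suffix_array(text, pattern, suffix_array = None, count = None):
--     if suffix_array is None:
--         suffix_array = build_suffix_array(text)
--
--     start = 0
--     end = len(suffix_array) - 1
--     if count is None:
--         count = 0
--
--     if start > end:
--         return count
--
--     middle = (start + end) // 2
--     suffix_idx = suffix_array[middle]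
--     suffix = text[suffix_idx:]
--     if start == end:
--         return count + int(suffix.startswith(pattern))
--
--     if suffix.startswith(pattern):
--         count += 1
--         count = binary_search_suffix_array(text, pattern, suffix_array[start:middle], count)
--         count = binary_search_suffix_array(text, pattern, suffix_array[middle + 1:], count)
--         return count
--     elif pattern < suffix:
--         count = binary_search_suffix_array(text, pattern, suffix_array[start:middle], count)
--     else:
--         count = binary_search_suffix_array(text, pattern, suffix_array[middle + 1:], count)
--     return count
-- ===== SOURCE B (Python) =====
-- def build_suffix_array(text):
--     suffixes = [(text[i:], i) for i in range(len(text))]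
--     suffixes.sort()
--     return [index for _, index in suffixes]
--
-- def binary_search_suffix_array(text, pattern, suffix_array=None, count=None):
--     # iterative tree walk over (lo, hi) index ranges with an explicit stack,
--     # instead of recursing on freshly sliced copies of the suffix array
--     if suffix_array is None:
--         suffix_array = build_suffix_array(text)
--     total = 0 if count is None else count
--     stack = [(0, len(suffix_array))]
--     while stack:
--         lo, hi = stack.pop()
--         if lo >= hi:
--             continue
--         mid = (lo + hi - 1) // 2
--         suffix = text[suffix_array[mid]:]
--         if suffix.startswith(pattern):
--             total += 1
--             stack.append((lo, mid))
--             stack.append((mid + 1, hi))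
--         elif pattern < suffix:
--             stack.append((lo, mid))
--         else:
--             stack.append((mid + 1, hi))
--     return total
-- ===== Notes on version B (the rewrite author's own statement) =====
-- stated objective: alternative
-- what changed: Replaces A's recursion on freshly sliced copies of the suffix array by an iterative tree walk over (lo, hi) index ranges kept on an explicit stack into the original array; the per-level list-slice copies disappear (B only materialises the suffix string A also builds at each visited node).
import Mathlib
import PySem

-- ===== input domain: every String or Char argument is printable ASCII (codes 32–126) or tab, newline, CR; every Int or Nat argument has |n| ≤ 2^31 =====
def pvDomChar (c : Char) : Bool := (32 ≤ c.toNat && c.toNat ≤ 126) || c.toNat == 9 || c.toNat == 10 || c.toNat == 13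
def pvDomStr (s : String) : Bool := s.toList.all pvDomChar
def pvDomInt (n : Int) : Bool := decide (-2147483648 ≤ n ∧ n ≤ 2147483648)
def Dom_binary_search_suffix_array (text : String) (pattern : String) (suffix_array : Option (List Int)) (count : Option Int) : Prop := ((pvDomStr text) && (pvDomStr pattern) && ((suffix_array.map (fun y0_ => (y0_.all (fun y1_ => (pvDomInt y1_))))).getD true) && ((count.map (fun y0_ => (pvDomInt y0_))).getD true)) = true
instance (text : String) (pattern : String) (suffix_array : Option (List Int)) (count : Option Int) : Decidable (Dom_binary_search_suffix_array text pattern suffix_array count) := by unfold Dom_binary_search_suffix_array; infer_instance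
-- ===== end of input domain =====

-- B replaces A's recursion on sliced copies of the suffix array by an iterative
-- tree walk over (lo, hi) index ranges on an explicit stack, avoiding the per-level
-- list-slice copies (objective: alternative).

-- ===== PORT A =====
-- helper build_suffix_array as used by A
def pvBuildA (text : String) : List Int :=
  let suffixes := (PySem.List.pyRange 0 (PySem.Str.len text) 1).map
    (fun i => (PySem.Str.slice text (some i) none, i))
  (PySem.List.sorted2 suffixes (fun p => p.1) (fun p => p.2)).map (fun p => p.2)

-- termination lemmas for the port of A (cited by name in decreasing_by; kept
-- omega-free so the definition bodies stay small)
lemma pvRecA_len_pos (sa : List Int) (h : ¬ (0 : Int) > (sa.length : Int) - 1) : 1 ≤ sa.length :=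
  Nat.cast_le (α := Int) |>.mp (by rw [Nat.cast_one]; exact sub_nonneg.mp (not_lt.mp h))

lemma pvRecA_mid_eq' (sa : List Int) (h1 : 1 ≤ sa.length) :
    PySem.Int.floordiv (0 + ((sa.length : Int) - 1)) 2 = (((sa.length - 1) / 2 : Nat) : Int) := by
  have e : (0 + ((sa.length : Int) - 1)) = (((sa.length - 1 : Nat)) : Int) := by
    rw [zero_add, Int.natCast_sub h1, Nat.cast_one]
  rw [e]
  exact PySem.Int.floordiv_natCast (sa.length - 1) 2

lemma pvRecA_dec_left (sa : List Int) (h : ¬ (0 : Int) > (sa.length : Int) - 1) :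
    (PySem.List.slice sa (some 0) (some (PySem.Int.floordiv (0 + ((sa.length : Int) - 1)) 2))).length < sa.length := by
  have h1 := pvRecA_len_pos sa h
  rw [pvRecA_mid_eq' sa h1, PySem.List.slice_zero_start, PySem.List.slice_to_natCast,
      List.length_take]
  exact min_lt_iff.mpr (Or.inl (Nat.lt_of_le_of_lt (Nat.div_le_self _ 2)
    (Nat.sub_lt h1 Nat.one_pos)))

lemma pvRecA_dec_right (sa : List Int) (h : ¬ (0 : Int) > (sa.length : Int) - 1) :
    (PySem.List.slice sa (some (PySem.Int.floordiv (0 + ((sa.length : Int) - 1)) 2 + 1)) none).length < sa.length := by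
  have h1 := pvRecA_len_pos sa h
  rw [pvRecA_mid_eq' sa h1, ← Nat.cast_add_one, PySem.List.slice_from_natCast, List.length_drop]
  exact Nat.sub_lt h1 (Nat.succ_pos _)

-- A's recursive core, once suffix_array and count are concrete (A only ever calls
-- itself with a list and an int); start is the literal 0 A assigns.
def pvRecA (text pattern : String) (sa : List Int) (count : Int) : Int :=
  let start : Int := 0
  let endv : Int := (sa.length : Int) - 1
  if _h0 : start > endv then count
  else
    let middle : Int := PySem.Int.floordiv (start + endv) 2
    let suffix_idx : Int := PySem.List.pyGetD sa middle 0   -- sa[middle], index provably in range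
    let suffix := PySem.Str.slice text (some suffix_idx) none
    if _h1 : start = endv then count + (if PySem.Str.startswith suffix pattern then 1 else 0)
    else if PySem.Str.startswith suffix pattern then
      let c1 := pvRecA text pattern (PySem.List.slice sa (some start) (some middle)) (count + 1)
      pvRecA text pattern (PySem.List.slice sa (some (middle + 1)) none) c1
    else if pattern < suffix then
      pvRecA text pattern (PySem.List.slice sa (some start) (some middle)) count
    else
      pvRecA text pattern (PySem.List.slice sa (some (middle + 1)) none) count
termination_by sa.length
decreasing_by
  · exact pvRecA_dec_left sa _h0
  · exact pvRecA_dec_right sa _h0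
  · exact pvRecA_dec_left sa _h0
  · exact pvRecA_dec_right sa _h0

def binary_search_suffix_array (text : String) (pattern : String) (suffix_array : Option (List Int)) (count : Option Int) : Int :=
  let sa := match suffix_array with
    | none => pvBuildA text
    | some l => l
  let c : Int := match count with
    | none => 0
    | some c => c
  pvRecA text pattern sa c

-- ===== PORT B =====
-- helper build_suffix_array as used by B (same helper code as in Source B)
def pvBuildB (text : String) : List Int :=
  let suffixes := (PySem.List.pyRange 0 (PySem.Str.len text) 1).map
    (fun i => (PySem.Str.slice text (some i) none, i))
  (PySem.List.sorted2 suffixes (fun p => p.1) (fun p => p.2)).map (fun p => p.2)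

-- termination lemmas for the port of B (cited by name in decreasing_by; omega-free)
lemma pvMidGe (lo hi : Nat) (h : lo < hi) : lo ≤ (lo + hi - 1) / 2 := by
  apply (Nat.le_div_iff_mul_le (by exact Nat.succ_pos 1)).mpr
  rw [Nat.mul_two, Nat.add_sub_assoc (Nat.one_le_of_lt (Nat.lt_of_le_of_lt (Nat.zero_le lo) h)) lo]
  exact Nat.add_le_add_left (Nat.le_sub_one_of_lt h) lo

lemma pvMidLt (lo hi : Nat) (h : lo < hi) : (lo + hi - 1) / 2 < hi := by
  apply (Nat.div_lt_iff_lt_mul (by exact Nat.succ_pos 1)).mpr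
  rw [Nat.mul_two]
  exact Nat.lt_of_lt_of_le
    (Nat.sub_lt (Nat.lt_of_lt_of_le h.pos (Nat.le_add_left hi lo)) Nat.one_pos)
    (Nat.add_le_add_right (Nat.le_of_lt h) hi)

lemma pvSegSplit (lo hi : Nat) (h : lo < hi) :
    hi - lo = ((lo + hi - 1) / 2 - lo) + (hi - (lo + hi - 1) / 2 - 1) + 1 := by
  have hge := pvMidGe lo hi h
  have hlt := pvMidLt lo hi h
  have h1 : hi - (lo + hi - 1) / 2 - 1 + 1 = hi - (lo + hi - 1) / 2 :=
    Nat.succ_pred_eq_of_pos (tsub_pos_of_lt hlt)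
  rw [Nat.add_assoc, h1, Nat.add_comm ((lo + hi - 1) / 2 - lo) _,
      Nat.sub_add_sub_cancel (Nat.le_of_lt hlt) hge]

lemma pvLoopB_dec_pop (lo hi : Nat) (rest : List (Nat × Nat)) :
    (List.map (fun pr : Nat × Nat => 2 * (pr.2 - pr.1) + 1) rest).sum
      < (List.map (fun pr : Nat × Nat => 2 * (pr.2 - pr.1) + 1) ((lo, hi) :: rest)).sum := by
  simp only [List.map_cons, List.sum_cons]
  exact Nat.lt_add_of_pos_left (Nat.succ_pos _)

lemma pvLoopB_dec_both (lo hi : Nat) (rest : List (Nat × Nat)) (h : ¬ hi ≤ lo) :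
    (List.map (fun pr : Nat × Nat => 2 * (pr.2 - pr.1) + 1)
        ((lo, (lo + hi - 1) / 2) :: ((lo + hi - 1) / 2 + 1, hi) :: rest)).sum
      < (List.map (fun pr : Nat × Nat => 2 * (pr.2 - pr.1) + 1) ((lo, hi) :: rest)).sum := by
  simp only [List.map_cons, List.sum_cons]
  have hlh := Nat.lt_of_not_le h
  have e : 2 * (hi - lo) + 1
      = (2 * ((lo + hi - 1) / 2 - lo) + 1 + (2 * (hi - ((lo + hi - 1) / 2 + 1)) + 1)) + 1 := by
    rw [← Nat.sub_sub hi ((lo + hi - 1) / 2) 1, pvSegSplit lo hi hlh,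
        Nat.mul_add, Nat.mul_add, Nat.mul_one, Nat.add_add_add_comm]
  rw [← Nat.add_assoc, e]
  exact Nat.add_lt_add_right (Nat.lt_succ_self _) _

lemma pvLoopB_dec_left (lo hi : Nat) (rest : List (Nat × Nat)) (h : ¬ hi ≤ lo) :
    (List.map (fun pr : Nat × Nat => 2 * (pr.2 - pr.1) + 1) ((lo, (lo + hi - 1) / 2) :: rest)).sum
      < (List.map (fun pr : Nat × Nat => 2 * (pr.2 - pr.1) + 1) ((lo, hi) :: rest)).sum := by
  simp only [List.map_cons, List.sum_cons]
  apply Nat.add_lt_add_right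
  apply Nat.succ_lt_succ
  exact mul_lt_mul_of_pos_left
    (Nat.sub_lt_sub_right (pvMidGe lo hi (Nat.lt_of_not_le h)) (pvMidLt lo hi (Nat.lt_of_not_le h))) (Nat.succ_pos 1)

lemma pvLoopB_dec_right (lo hi : Nat) (rest : List (Nat × Nat)) (h : ¬ hi ≤ lo) :
    (List.map (fun pr : Nat × Nat => 2 * (pr.2 - pr.1) + 1) (((lo + hi - 1) / 2 + 1, hi) :: rest)).sum
      < (List.map (fun pr : Nat × Nat => 2 * (pr.2 - pr.1) + 1) ((lo, hi) :: rest)).sum := by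
  simp only [List.map_cons, List.sum_cons]
  apply Nat.add_lt_add_right
  apply Nat.succ_lt_succ
  exact mul_lt_mul_of_pos_left
    (Nat.sub_lt_sub_left (Nat.lt_of_not_le h) (Nat.lt_succ_of_le (pvMidGe lo hi (Nat.lt_of_not_le h)))) (Nat.succ_pos 1)

-- B's while-loop over the explicit stack (head of the list = top of the stack);
-- suffix_array[mid] is read with pyGetD (mid is provably in range where read)
def pvLoopB (text pattern : String) (sa : List Int) : List (Nat × Nat) → Int → Int
  | [], total => total
  | (lo, hi) :: rest, total =>
    if _h : hi ≤ lo then pvLoopB text pattern sa rest total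
    else
      let mid := (lo + hi - 1) / 2
      let suffix := PySem.Str.slice text (some (PySem.List.pyGetD sa ((mid : Nat) : Int) 0)) none
      if PySem.Str.startswith suffix pattern then
        pvLoopB text pattern sa ((lo, mid) :: (mid + 1, hi) :: rest) (total + 1)
      else if pattern < suffix then pvLoopB text pattern sa ((lo, mid) :: rest) total
      else pvLoopB text pattern sa ((mid + 1, hi) :: rest) total
termination_by stack => (stack.map (fun pr => 2 * (pr.2 - pr.1) + 1)).sum
decreasing_by
  · exact pvLoopB_dec_pop lo hi rest
  · exact pvLoopB_dec_both lo hi rest _h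
  · exact pvLoopB_dec_left lo hi rest _h
  · exact pvLoopB_dec_right lo hi rest _h

def binary_search_suffix_array_alt (text : String) (pattern : String) (suffix_array : Option (List Int)) (count : Option Int) : Int :=
  let sa := match suffix_array with
    | none => pvBuildB text
    | some l => l
  let total : Int := match count with
    | none => 0
    | some c => c
  pvLoopB text pattern sa [(0, sa.length)] total

-- ===== PRECONDITION & SPEC =====
def Spec_binary_search_suffix_array (text : String) (pattern : String) (suffix_array : Option (List Int)) (count : Option Int) (out : Int) : Prop := out = binary_search_suffix_array_alt text pattern suffix_array count
instance (text : String) (pattern : String) (suffix_array : Option (List Int)) (count : Option Int) (out : Int) : Decidable (Spec_binary_search_suffix_array text pattern suffix_array count out) := by unfold Spec_binary_search_suffix_array; infer_instance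

-- ===== CLAIM =====
def Claim_equal_binary_search_suffix_array : Prop := ∀ (text : String) (pattern : String) (suffix_array : Option (List Int)) (count : Option Int), Dom_binary_search_suffix_array text pattern suffix_array count → Spec_binary_search_suffix_array text pattern suffix_array count (binary_search_suffix_array text pattern suffix_array count)

-- ===== LEMMAS AND PROOFS =====

-- pvSeg termination lemmas
lemma pvSeg_dec_left (lo hi : Nat) (h : ¬ hi ≤ lo) : lo + (hi - lo - 1) / 2 - lo < hi - lo := by
  rw [Nat.add_sub_cancel_left]
  exact Nat.lt_of_le_of_lt (Nat.div_le_self _ 2)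
    (Nat.sub_lt (tsub_pos_of_lt (Nat.lt_of_not_le h)) Nat.one_pos)

lemma pvSeg_dec_right (lo hi : Nat) (h : ¬ hi ≤ lo) : hi - (lo + (hi - lo - 1) / 2 + 1) < hi - lo := by
  rw [Nat.add_assoc]
  exact Nat.sub_lt_sub_left (Nat.lt_of_not_le h) (Nat.lt_add_of_pos_right (Nat.succ_pos _))


-- the per-segment count both programs compute for a segment [lo, hi) of sa
def pvSeg (text pattern : String) (sa : List Int) (lo hi : Nat) : Int :=
  if _h : hi ≤ lo then 0
  else
    let mid := lo + (hi - lo - 1) / 2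
    let suffix := PySem.Str.slice text (some (PySem.List.pyGetD sa (mid : Int) 0)) none
    if PySem.Str.startswith suffix pattern then
      1 + pvSeg text pattern sa lo mid + pvSeg text pattern sa (mid + 1) hi
    else if pattern < suffix then pvSeg text pattern sa lo mid
    else pvSeg text pattern sa (mid + 1) hi
termination_by hi - lo
decreasing_by
  · exact pvSeg_dec_left lo hi _h
  · exact pvSeg_dec_right lo hi _h
  · exact pvSeg_dec_left lo hi _h
  · exact pvSeg_dec_right lo hi _h

lemma pvLoopB_eq (text pattern : String) (sa : List Int) :
    ∀ (stack : List (Nat × Nat)) (total : Int),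
      pvLoopB text pattern sa stack total
        = total + (stack.map (fun pr => pvSeg text pattern sa pr.1 pr.2)).sum := by
  intro stack total
  fun_induction pvLoopB text pattern sa stack total with
  | case1 total => simp
  | case2 lo hi rest total h ih =>
    rw [ih, List.map_cons, List.sum_cons, pvSeg, dif_pos h]
    ring
  | case3 lo hi rest total h mid suffix hsw ih =>
    have hmid : mid = lo + (hi - lo - 1) / 2 := by show (lo + hi - 1) / 2 = _; omega
    have hnode : pvSeg text pattern sa lo hi
        = 1 + pvSeg text pattern sa lo mid + pvSeg text pattern sa (mid + 1) hi := by
      rw [pvSeg, dif_neg h]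
      simp only []
      rw [← hmid, if_pos hsw]
    rw [ih]
    simp only [List.map_cons, List.sum_cons]
    rw [hnode]
    ring
  | case4 lo hi rest total h mid suffix hsw hlt ih =>
    have hmid : mid = lo + (hi - lo - 1) / 2 := by show (lo + hi - 1) / 2 = _; omega
    have hnode : pvSeg text pattern sa lo hi = pvSeg text pattern sa lo mid := by
      rw [pvSeg, dif_neg h]
      simp only []
      have hsw' : ¬ PySem.Str.startswith (PySem.Str.slice text (some (PySem.List.pyGetD sa ((mid : Nat) : Int) 0)) none) pattern = true := hsw
      rw [← hmid, if_neg hsw', if_pos hlt]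
    rw [ih]
    simp only [List.map_cons, List.sum_cons]
    rw [hnode]
  | case5 lo hi rest total h mid suffix hsw hnlt ih =>
    have hmid : mid = lo + (hi - lo - 1) / 2 := by show (lo + hi - 1) / 2 = _; omega
    have hnode : pvSeg text pattern sa lo hi = pvSeg text pattern sa (mid + 1) hi := by
      rw [pvSeg, dif_neg h]
      simp only []
      have hsw' : ¬ PySem.Str.startswith (PySem.Str.slice text (some (PySem.List.pyGetD sa ((mid : Nat) : Int) 0)) none) pattern = true := hsw
      rw [← hmid, if_neg hsw', if_neg hnlt]
    rw [ih]
    simp only [List.map_cons, List.sum_cons]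
    rw [hnode]

-- sa[lo+m] read through the segment list
lemma pv_seg_getD (sa : List Int) (lo hi m : Nat) (hm : m < hi - lo) (hhs : hi ≤ sa.length) :
    PySem.List.pyGetD ((sa.drop lo).take (hi - lo)) ((m : Nat) : Int) 0
      = PySem.List.pyGetD sa ((lo + m : Nat) : Int) 0 := by
  rw [PySem.List.pyGetD_natCast, PySem.List.pyGetD_natCast]
  rw [List.getD_eq_getElem _ 0 (by simp [List.length_take, List.length_drop]; omega),
      List.getD_eq_getElem _ 0 (by omega)]
  rw [List.getElem_take, List.getElem_drop]

lemma pvSeg_zero (text pattern : String) (sa : List Int) (lo hi : Nat) (h : hi ≤ lo) :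
    pvSeg text pattern sa lo hi = 0 := by
  rw [pvSeg, dif_pos h]

lemma pvRecA_seg (text pattern : String) (sa : List Int) :
    ∀ (d lo hi : Nat) (c : Int), hi - lo = d → lo ≤ hi → hi ≤ sa.length →
      pvRecA text pattern ((sa.drop lo).take (hi - lo)) c = c + pvSeg text pattern sa lo hi := by
  intro d
  induction d using Nat.strong_induction_on with
  | _ d ih =>
  intro lo hi c hd hlh hhs
  have hL : ((sa.drop lo).take (hi - lo)).length = hi - lo := by
    simp [List.length_take, List.length_drop]; omega
  by_cases hempty : hi = lo
  · subst hempty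
    rw [pvRecA]
    simp only []
    rw [dif_pos (by rw [hL]; omega), pvSeg_zero text pattern sa _ _ (Nat.le_refl _)]
    ring
  · -- nonempty segment
    have h1 : 1 ≤ hi - lo := by omega
    have hm : PySem.Int.floordiv (0 + ((((sa.drop lo).take (hi - lo)).length : Int) - 1)) 2
        = (((hi - lo - 1) / 2 : Nat) : Int) := by
      rw [hL]
      have : (0 + ((hi - lo : Nat) - 1 : Int)) = (((hi - lo - 1 : Nat)) : Int) := by omega
      rw [this]
      exact_mod_cast PySem.Int.floordiv_natCast (hi - lo - 1) 2
    have hmlt : (hi - lo - 1) / 2 < hi - lo := by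
      have := Nat.div_le_self (hi - lo - 1) 2; omega
    have hget := pv_seg_getD sa lo hi ((hi - lo - 1) / 2) hmlt hhs
    by_cases hone : hi = lo + 1
    · -- single element: A's start == end branch
      subst hone
      rw [pvRecA]
      simp only []
      rw [dif_neg (by rw [hL]; simp), hm, hget, dif_pos (by rw [hL]; simp)]
      rw [pvSeg, dif_neg (by omega)]
      simp only []
      by_cases hsw : PySem.Str.startswith
          (PySem.Str.slice text (some (PySem.List.pyGetD sa ((lo + (lo + 1 - lo - 1) / 2 : Nat) : Int) 0)) none) pattern = true
      · rw [if_pos hsw, if_pos (by convert hsw using 4)]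
        rw [pvSeg_zero text pattern sa _ _ (by omega), pvSeg_zero text pattern sa _ _ (by omega)]
        ring
      · rw [if_neg hsw, if_neg (by intro hx; exact hsw (by convert hx using 4))]
        split
        · rw [pvSeg_zero text pattern sa _ _ (by omega)]
        · rw [pvSeg_zero text pattern sa _ _ (by omega)]
    · -- two or more elements: A's recursive branch
      have h2 : 2 ≤ hi - lo := by omega
      have hleft : PySem.List.slice ((sa.drop lo).take (hi - lo)) (some 0)
            (some (((hi - lo - 1) / 2 : Nat) : Int))
          = (sa.drop lo).take ((lo + (hi - lo - 1) / 2) - lo) := by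
        rw [PySem.List.slice_zero_start, PySem.List.slice_to_natCast, List.take_take]
        congr 1
        omega
      have hright : PySem.List.slice ((sa.drop lo).take (hi - lo))
            (some ((((hi - lo - 1) / 2 : Nat) : Int) + 1)) none
          = (sa.drop (lo + (hi - lo - 1) / 2 + 1)).take (hi - (lo + (hi - lo - 1) / 2 + 1)) := by
        have hc : ((((hi - lo - 1) / 2 : Nat) : Int) + 1) = (((hi - lo - 1) / 2 + 1 : Nat) : Int) := by
          push_cast; ring
        rw [hc, PySem.List.slice_from_natCast, List.drop_take, List.drop_drop]
        congr 1
        omega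
      rw [pvRecA]
      simp only []
      rw [dif_neg (by rw [hL]; omega), hm, hget, dif_neg (by rw [hL]; omega)]
      rw [pvSeg, dif_neg (by omega)]
      simp only []
      by_cases hsw : PySem.Str.startswith
          (PySem.Str.slice text (some (PySem.List.pyGetD sa ((lo + (hi - lo - 1) / 2 : Nat) : Int) 0)) none) pattern = true
      · rw [if_pos hsw, if_pos hsw, hleft, hright]
        rw [ih ((lo + (hi - lo - 1) / 2) - lo) (by omega) lo (lo + (hi - lo - 1) / 2) (c + 1) rfl (by omega) (by omega)]
        rw [ih (hi - (lo + (hi - lo - 1) / 2 + 1)) (by omega) (lo + (hi - lo - 1) / 2 + 1) hi _ rfl (by omega) (by omega)]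
        ring
      · rw [if_neg hsw, if_neg hsw]
        by_cases hlt : pattern < PySem.Str.slice text
            (some (PySem.List.pyGetD sa ((lo + (hi - lo - 1) / 2 : Nat) : Int) 0)) none
        · rw [if_pos hlt, if_pos hlt, hleft]
          rw [ih ((lo + (hi - lo - 1) / 2) - lo) (by omega) lo (lo + (hi - lo - 1) / 2) c rfl (by omega) (by omega)]
        · rw [if_neg hlt, if_neg hlt, hright]
          rw [ih (hi - (lo + (hi - lo - 1) / 2 + 1)) (by omega) (lo + (hi - lo - 1) / 2 + 1) hi c rfl (by omega) (by omega)]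

-- ===== VERDICT =====
theorem binary_search_suffix_array_spec : Claim_equal_binary_search_suffix_array := by
  intro text pattern suffix_array count _hdom
  unfold Spec_binary_search_suffix_array
  unfold binary_search_suffix_array binary_search_suffix_array_alt
  have hb : pvBuildB text = pvBuildA text := rfl
  have key : ∀ (sa : List Int) (c : Int),
      pvRecA text pattern sa c = pvLoopB text pattern sa [(0, sa.length)] c := by
    intro sa c
    rw [pvLoopB_eq]
    simp only [List.map_cons, List.map_nil, List.sum_cons, List.sum_nil, Int.add_zero]
    have h := pvRecA_seg text pattern sa sa.length 0 sa.length c (by omega) (by omega) (Nat.le_refl _)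
    simpa using h
  cases suffix_array with
  | none => cases count with
    | none => simp only [hb]; exact key _ _
    | some c => simp only [hb]; exact key _ _
  | some l => cases count with
    | none => exact key _ _
    | some c => exact key _ _
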